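-- pv_equiv track=rewrite | github.com/donatomaurizio99-collab/GOC | scripts/master-required-checks-24h-report.py | _build_job_conclusion_map
-- ===== SOURCE A (Python) =====
-- from typing import Any
--
-- CONCLUSION_SEVERITY = {
--     "success": 0,
--     "neutral": 1,
--     "skipped": 1,
--     "cancelled": 2,
--     "timed_out": 3,
--     "failure": 4,
--     "action_required": 5,
-- }
--
-- def _collapse_job_conclusion(conclusions: list[str]) -> str:
--     normalized = [str(item).strip().lower() for item in conclusions if str(item).strip()]
--     if not normalized:
--         return ""
--     return max(normalized, key=lambda item: CONCLUSION_SEVERITY.get(item, 6))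
--
-- def _build_job_conclusion_map(jobs: list[dict[str, Any]]) -> tuple[dict[str, str], list[str], int, int]:
--     conclusions_by_name: dict[str, list[str]] = {}
--     named_job_entries_total = 0
--     for job in jobs:
--         name = str(job.get("name") or "").strip()
--         if not name:
--             continue
--         named_job_entries_total += 1
--         conclusions_by_name.setdefault(name, []).append(str(job.get("conclusion") or ""))
--
--     job_map: dict[str, str] = {}
--     duplicate_job_names: list[str] = []
--     for name, conclusions in conclusions_by_name.items():
--         if len(conclusions) > 1:
--             duplicate_job_names.append(name)
--         job_map[name] = _collapse_job_conclusion(conclusions)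
--
--     duplicate_job_entries_dropped = max(0, named_job_entries_total - len(job_map))
--     return job_map, sorted(duplicate_job_names), named_job_entries_total, duplicate_job_entries_dropped
-- ===== SOURCE B (Python) =====
-- from typing import Any
--
-- CONCLUSION_SEVERITY = {
--     "success": 0,
--     "neutral": 1,
--     "skipped": 1,
--     "cancelled": 2,
--     "timed_out": 3,
--     "failure": 4,
--     "action_required": 5,
-- }
--
-- def _build_job_conclusion_map(jobs: list[dict[str, Any]]) -> tuple[dict[str, str], list[str], int, int]:
--     # Single pass: per name keep (best_conclusion, best_severity, entry_count).
--     best: dict[str, tuple[str, int, int]] = {}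
--     named_job_entries_total = 0
--     for job in jobs:
--         name = str(job.get("name") or "").strip()
--         if not name:
--             continue
--         named_job_entries_total += 1
--         b, s, c = best.get(name, ("", -1, 0))
--         norm = str(job.get("conclusion") or "").strip().lower()
--         if norm:
--             sev = CONCLUSION_SEVERITY.get(norm, 6)
--             if sev > s:
--                 b, s = norm, sev
--         best[name] = (b, s, c + 1)
--     job_map = {name: v[0] for name, v in best.items()}
--     duplicate_job_names = sorted(name for name, v in best.items() if v[2] > 1)
--     return job_map, duplicate_job_names, named_job_entries_total, max(0, named_job_entries_total - len(job_map))
-- ===== Notes on version B (the rewrite author's own statement) =====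
-- stated objective: simpler
-- what changed: Replaces A's two-pass design (group all conclusions per name into lists, then collapse each list with max(key=severity)) by a single pass that keeps only a running (best_conclusion, best_severity, entry_count) triple per name, using strict '>' to preserve max's first-on-tie choice; no per-name conclusion lists and no collapse helper are ever built.
import Mathlib
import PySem

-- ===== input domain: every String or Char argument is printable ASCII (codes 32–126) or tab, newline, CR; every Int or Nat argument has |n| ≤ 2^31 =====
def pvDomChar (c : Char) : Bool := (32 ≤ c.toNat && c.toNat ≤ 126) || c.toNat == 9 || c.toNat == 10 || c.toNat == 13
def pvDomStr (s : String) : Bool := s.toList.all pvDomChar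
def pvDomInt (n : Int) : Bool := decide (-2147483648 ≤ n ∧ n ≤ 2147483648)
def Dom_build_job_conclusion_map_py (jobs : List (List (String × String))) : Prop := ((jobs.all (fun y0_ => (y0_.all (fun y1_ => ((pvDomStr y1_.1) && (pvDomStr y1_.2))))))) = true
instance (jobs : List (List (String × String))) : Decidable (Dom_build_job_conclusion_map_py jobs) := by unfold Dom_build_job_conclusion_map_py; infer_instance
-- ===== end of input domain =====

-- B replaces A's two-pass design (group conclusions per name, then collapse each list with
-- max(key=severity)) by a single pass keeping a running (best, severity, count) triple per name;
-- objective: simpler (no per-name lists, no collapse helper). Return value only; no mutation.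

-- ===== PORT A =====
-- module constant CONCLUSION_SEVERITY (shared context of both implementations)
def CONCLUSION_SEVERITY : PySem.Dict String Int :=
  PySem.Dict.ofList [("success", 0), ("neutral", 1), ("skipped", 1), ("cancelled", 2),
    ("timed_out", 3), ("failure", 4), ("action_required", 5)]

-- str(job.get(k) or ""): dict lookup; None and "" both give ""
def jobGet (job : List (String × String)) (k : String) : String :=
  ((PySem.Dict.ofList job).get? k).getD ""

-- CONCLUSION_SEVERITY.get(item, 6)
def sevKey (item : String) : Int := CONCLUSION_SEVERITY.getD item 6

-- _collapse_job_conclusion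
def collapse_job_conclusion (conclusions : List String) : String :=
  let normalized := (conclusions.filter (fun item => PySem.Str.strip item ≠ "")).map
      (fun item => PySem.Str.lower (PySem.Str.strip item))
  if normalized = [] then ""
  else (PySem.List.max? normalized sevKey).getD ""

-- first loop of A: group conclusions by stripped non-empty name, count named entries
def aStep (st : PySem.Dict String (List String) × Int) (job : List (String × String)) :
    PySem.Dict String (List String) × Int :=
  let name := PySem.Str.strip (jobGet job "name")
  if name = "" then st
  else (st.1.modify name [] (fun cs => cs ++ [jobGet job "conclusion"]), st.2 + 1)

-- second loop of A: build job_map and duplicate_job_names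
def aStep2 (st : PySem.Dict String String × List String) (p : String × List String) :
    PySem.Dict String String × List String :=
  (st.1.insert p.1 (collapse_job_conclusion p.2),
   if PySem.List.len p.2 > 1 then st.2 ++ [p.1] else st.2)

def build_job_conclusion_map_py (jobs : List (List (String × String))) :
    (List (String × String)) × List String × Int × Int :=
  let st := jobs.foldl aStep (PySem.Dict.empty, 0)
  let st2 := st.1.items.foldl aStep2 (PySem.Dict.empty, [])
  (st2.1.items, PySem.List.sorted st2.2 (fun x => x) false, st.2,
   max 0 (st.2 - (PySem.Dict.size st2.1 : Int)))

-- ===== PORT B =====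
-- single pass: per name keep (best_conclusion, best_severity, entry_count)
def bStep (st : PySem.Dict String (String × Int × Int) × Int) (job : List (String × String)) :
    PySem.Dict String (String × Int × Int) × Int :=
  let name := PySem.Str.strip (jobGet job "name")
  if name = "" then st
  else
    let v := st.1.getD name ("", -1, 0)
    let norm := PySem.Str.lower (PySem.Str.strip (jobGet job "conclusion"))
    let bs := if norm = "" then (v.1, v.2.1)
              else (let sv := sevKey norm; if sv > v.2.1 then (norm, sv) else (v.1, v.2.1))
    (st.1.insert name (bs.1, bs.2, v.2.2 + 1), st.2 + 1)

def build_job_conclusion_map_py_alt (jobs : List (List (String × String))) :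
    (List (String × String)) × List String × Int × Int :=
  let st := jobs.foldl bStep (PySem.Dict.empty, 0)
  let job_map := st.1.items.map (fun p => (p.1, p.2.1))
  let dups := PySem.List.sorted ((st.1.items.filter (fun p => p.2.2.2 > 1)).map (fun p => p.1))
      (fun x => x) false
  (job_map, dups, st.2, max 0 (st.2 - PySem.List.len job_map))

-- ===== PRECONDITION & SPEC =====
def Spec_build_job_conclusion_map_py (jobs : List (List (String × String))) (out : (List (String × String)) × List String × Int × Int) : Prop := out = build_job_conclusion_map_py_alt jobs
instance (jobs : List (List (String × String))) (out : (List (String × String)) × List String × Int × Int) : Decidable (Spec_build_job_conclusion_map_py jobs out) := by unfold Spec_build_job_conclusion_map_py; infer_instance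

-- ===== CLAIM (what is proved, stated in full; the proofs are below) =====
def Claim_equal_build_job_conclusion_map_py : Prop := ∀ (jobs : List (List (String × String))), Dom_build_job_conclusion_map_py jobs → Spec_build_job_conclusion_map_py jobs (build_job_conclusion_map_py jobs)

-- ===== LEMMAS AND PROOFS =====
set_option maxHeartbeats 4000000

-- normalization of one conclusion string
def nrm (s : String) : String := PySem.Str.lower (PySem.Str.strip s)

-- B's running-best update on one (already normalized, non-empty) conclusion
def pureStep (bs : String × Int) (x : String) : String × Int :=
  if sevKey x > bs.2 then (x, sevKey x) else bs

-- B's running-best update on one raw conclusion string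
def bUpd (bs : String × Int) (c : String) : String × Int :=
  if nrm c = "" then bs else pureStep bs (nrm c)

-- abstraction: the triple B stores for a name whose raw conclusion list (in A) is cs
def absState (cs : List String) : String × Int × Int :=
  let bs := cs.foldl bUpd ("", -1)
  (bs.1, bs.2, (cs.length : Int))

def Fmap (p : String × List String) : String × (String × Int × Int) := (p.1, absState p.2)

def mapD (d : PySem.Dict String (List String)) : PySem.Dict String (String × Int × Int) :=
  PySem.Dict.mk (d.items.map Fmap)

lemma sev_items : CONCLUSION_SEVERITY.items = [("success", 0), ("neutral", 1), ("skipped", 1),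
    ("cancelled", 2), ("timed_out", 3), ("failure", 4), ("action_required", 5)] := by decide

lemma sevKey_nonneg (x : String) : 0 ≤ sevKey x := by
  unfold sevKey
  rw [PySem.Dict.getD_eq_get?_getD]
  rcases h : CONCLUSION_SEVERITY.get? x with _ | v
  · simp
  · have hm := PySem.Dict.mem_items_of_get?_eq_some CONCLUSION_SEVERITY h
    rw [sev_items] at hm
    simp only [List.mem_cons, List.not_mem_nil, or_false, Prod.mk.injEq] at hm
    rcases hm with ⟨_, hv⟩ | ⟨_, hv⟩ | ⟨_, hv⟩ | ⟨_, hv⟩ | ⟨_, hv⟩ | ⟨_, hv⟩ | ⟨_, hv⟩ <;>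
      simp [hv]

lemma lower_eq_empty (t : String) : PySem.Str.lower t = "" ↔ t = "" := by
  constructor
  · intro h
    have h2 := congrArg String.toList h
    rw [PySem.Str.toList_lower] at h2
    simp only [PySem.Chars.lower] at h2
    simpa using h2
  · intro h; subst h; rfl

lemma nrm_eq_empty_iff (s : String) : nrm s = "" ↔ PySem.Str.strip s = "" :=
  lower_eq_empty (PySem.Str.strip s)

lemma find?_map_Fmap (l : List (String × List String)) (k : String) :
    (l.map Fmap).find? (fun p => p.1 == k) = (l.find? (fun p => p.1 == k)).map Fmap := by
  induction l with
  | nil => simp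
  | cons h t ih =>
    by_cases hk : h.1 == k <;> simp [List.find?, Fmap, hk, ih]

lemma get?_mapD (d : PySem.Dict String (List String)) (k : String) :
    (mapD d).get? k = (d.get? k).map absState := by
  show ((d.items.map Fmap).find? (fun p => p.1 == k)).map (fun x => x.2) =
    ((d.items.find? (fun p => p.1 == k)).map (fun x => x.2)).map absState
  rw [find?_map_Fmap]
  cases h : d.items.find? (fun p => p.1 == k) with
  | none => simp
  | some p => simp [Fmap]

lemma contains_mapD (d : PySem.Dict String (List String)) (k : String) :
    (mapD d).contains k = d.contains k := by
  rw [PySem.Dict.contains_eq_isSome_get?, PySem.Dict.contains_eq_isSome_get?, get?_mapD]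
  rcases d.get? k with _ | v <;> simp

lemma absState_append (cs : List String) (c : String) :
    absState (cs ++ [c]) =
      ((bUpd ((absState cs).1, (absState cs).2.1) c).1,
       (bUpd ((absState cs).1, (absState cs).2.1) c).2, (absState cs).2.2 + 1) := by
  simp only [absState, List.foldl_append, List.foldl_cons, List.foldl_nil, List.length_append,
    List.length_singleton]
  rfl

lemma items_mapD (d : PySem.Dict String (List String)) :
    (mapD d).items = d.items.map Fmap := rfl

def gUpd (v : String × Int × Int) (c : String) : String × Int × Int :=
  ((bUpd (v.1, v.2.1) c).1, (bUpd (v.1, v.2.1) c).2, v.2.2 + 1)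

lemma mapD_insert (d : PySem.Dict String (List String)) (name c : String) :
    (mapD d).insert name (gUpd ((mapD d).getD name ("", -1, 0)) c)
      = mapD (d.insert name (d.getD name [] ++ [c])) := by
  apply PySem.Dict.ext
  by_cases hcont : d.contains name = true
  · obtain ⟨cs, hcs⟩ : ∃ cs, d.get? name = some cs := by
      rcases hg : d.get? name with _ | cs
      · rw [PySem.Dict.get?_eq_none_iff_contains] at hg; rw [hcont] at hg; cases hg
      · exact ⟨cs, rfl⟩
    have hvv : (mapD d).getD name ("", -1, 0) = absState cs := by
      rw [PySem.Dict.getD_eq_get?_getD, get?_mapD, hcs]; rfl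
    have hgd : d.getD name [] = cs := by rw [PySem.Dict.getD_eq_get?_getD, hcs]; rfl
    rw [PySem.Dict.items_insert_of_contains _ _ ((contains_mapD d name).trans hcont), hgd,
        items_mapD, items_mapD, PySem.Dict.items_insert_of_contains _ _ hcont,
        List.map_map, List.map_map]
    apply List.map_congr_left
    intro p _
    simp only [Function.comp_apply, Fmap]
    by_cases hpk : (p.1 == name) = true
    · rw [if_pos hpk, if_pos hpk]
      show (name, gUpd ((mapD d).getD name ("", -1, 0)) c) = (name, absState (cs ++ [c]))
      rw [hvv, absState_append cs c]
      rfl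
    · rw [if_neg hpk, if_neg hpk]
  · have hcontf : d.contains name = false := by simpa using hcont
    have hgnone : d.get? name = none := (PySem.Dict.get?_eq_none_iff_contains d name).mpr hcontf
    have hvv : (mapD d).getD name ("", -1, 0) = ("", -1, 0) := by
      rw [PySem.Dict.getD_eq_get?_getD, get?_mapD, hgnone]; rfl
    have hgd : d.getD name [] = [] := by rw [PySem.Dict.getD_eq_get?_getD, hgnone]; rfl
    rw [PySem.Dict.items_insert_of_not_contains _ _ (by rw [contains_mapD]; exact hcontf), hgd,
        items_mapD, items_mapD, PySem.Dict.items_insert_of_not_contains _ _ hcontf,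
        List.map_append, hvv]
    have htail : List.map Fmap [(name, [] ++ [c])] = [(name, gUpd ("", -1, 0) c)] := by
      simp only [List.map_cons, List.map_nil, Fmap, List.nil_append]
      have habs : absState [c] = gUpd ("", -1, 0) c := by
        simp only [absState, gUpd, List.foldl_cons, List.foldl_nil, List.length_cons,
          List.length_nil]
        rfl
      rw [habs]
    rw [htail]

lemma aStep_neg (d : PySem.Dict String (List String)) (t : Int) (job : List (String × String))
    (h : PySem.Str.strip (jobGet job "name") = "") : aStep (d, t) job = (d, t) := by
  unfold aStep; rw [if_pos h]

lemma aStep_pos (d : PySem.Dict String (List String)) (t : Int) (job : List (String × String))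
    (h : ¬ PySem.Str.strip (jobGet job "name") = "") :
    aStep (d, t) job = (d.insert (PySem.Str.strip (jobGet job "name"))
      (d.getD (PySem.Str.strip (jobGet job "name")) [] ++ [jobGet job "conclusion"]), t + 1) := by
  unfold aStep; rw [if_neg h]; rfl

lemma bStep_neg (e : PySem.Dict String (String × Int × Int)) (t : Int)
    (job : List (String × String)) (h : PySem.Str.strip (jobGet job "name") = "") :
    bStep (e, t) job = (e, t) := by
  unfold bStep; rw [if_pos h]

lemma bStep_pos (e : PySem.Dict String (String × Int × Int)) (t : Int)
    (job : List (String × String)) (h : ¬ PySem.Str.strip (jobGet job "name") = "") :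
    bStep (e, t) job = (e.insert (PySem.Str.strip (jobGet job "name"))
      (gUpd (e.getD (PySem.Str.strip (jobGet job "name")) ("", -1, 0))
        (jobGet job "conclusion")), t + 1) := by
  unfold bStep; rw [if_neg h]; rfl

lemma step_comm (d : PySem.Dict String (List String)) (t : Int)
    (job : List (String × String)) :
    bStep (mapD d, t) job = (mapD (aStep (d, t) job).1, (aStep (d, t) job).2) := by
  by_cases hname : PySem.Str.strip (jobGet job "name") = ""
  · rw [aStep_neg d t job hname, bStep_neg (mapD d) t job hname]
  · rw [aStep_pos d t job hname, bStep_pos (mapD d) t job hname]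
    exact Prod.ext (mapD_insert d _ _) rfl

lemma nodup_aStep (d : PySem.Dict String (List String)) (t : Int) (job : List (String × String))
    (hnd : d.keys.Nodup) : (aStep (d, t) job).1.keys.Nodup := by
  by_cases h : PySem.Str.strip (jobGet job "name") = ""
  · rw [aStep_neg d t job h]; exact hnd
  · rw [aStep_pos d t job h]
    exact PySem.Dict.nodup_keys_insert _ _ _ hnd

lemma loop_comm (jobs : List (List (String × String))) :
    ∀ (d : PySem.Dict String (List String)) (t : Int),
    jobs.foldl bStep (mapD d, t) =
      (mapD (jobs.foldl aStep (d, t)).1, (jobs.foldl aStep (d, t)).2) := by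
  induction jobs with
  | nil => intro d t; rfl
  | cons job rest ih =>
    intro d t
    simp only [List.foldl_cons, step_comm d t job]
    rw [← Prod.mk.eta (p := aStep (d, t) job)]
    exact ih _ _

lemma nodup_aFold (jobs : List (List (String × String))) :
    ∀ (d : PySem.Dict String (List String)) (t : Int), d.keys.Nodup →
    (jobs.foldl aStep (d, t)).1.keys.Nodup := by
  induction jobs with
  | nil => intro d t h; exact h
  | cons job rest ih =>
    intro d t hnd
    have h2 := nodup_aStep d t job hnd
    simp only [List.foldl_cons]
    rw [← Prod.mk.eta (p := aStep (d, t) job)] at h2 ⊢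
    exact ih _ _ h2

-- the option-valued fold that PySem.List.max? performs
def optStep (acc : Option String) (x : String) : Option String :=
  match acc with
  | none => some x
  | some m => if sevKey m < sevKey x then some x else some m

def pick : Option String → String × Int
  | none => ("", -1)
  | some m => (m, sevKey m)

lemma max?_eq_foldl_optStep (ns : List String) :
    PySem.List.max? ns sevKey = ns.foldl optStep none := by
  unfold PySem.List.max?
  congr 1
  funext acc x
  cases acc <;> rfl

lemma fold_pure_eq_pick (ns : List String) :
    ∀ acc, ns.foldl pureStep (pick acc) = pick (ns.foldl optStep acc) := by
  induction ns with
  | nil => intro acc; rfl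
  | cons x t ih =>
    intro acc
    have hstep : pureStep (pick acc) x = pick (optStep acc x) := by
      rcases acc with _ | m
      · have := sevKey_nonneg x
        simp only [pick, pureStep, optStep]
        rw [if_pos (by omega)]
      · simp only [pick, pureStep, optStep]
        by_cases h : sevKey m < sevKey x
        · rw [if_pos (by omega), if_pos h]
        · rw [if_neg (by omega), if_neg h]
    simpa [hstep] using ih (optStep acc x)

lemma optStep_fold_some (t : List String) :
    ∀ (x : String), ∃ m, t.foldl optStep (some x) = some m := by
  induction t with
  | nil => intro x; exact ⟨x, rfl⟩
  | cons y s ih =>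
    intro x
    simp only [List.foldl_cons, optStep]
    by_cases h : sevKey x < sevKey y
    · rw [if_pos h]; exact ih y
    · rw [if_neg h]; exact ih x

lemma fold_bUpd_eq_norm (cs : List String) : ∀ bs,
    cs.foldl bUpd bs =
      ((cs.filter (fun item => PySem.Str.strip item ≠ "")).map
        (fun item => PySem.Str.lower (PySem.Str.strip item))).foldl pureStep bs := by
  induction cs with
  | nil => intro bs; simp
  | cons c t ih =>
    intro bs
    rw [List.foldl_cons]
    by_cases h : PySem.Str.strip c = ""
    · have hn : bUpd bs c = bs := by rw [bUpd, if_pos ((nrm_eq_empty_iff c).mpr h)]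
      rw [hn, ih, List.filter_cons_of_neg (by simp [h])]
    · have hn : bUpd bs c = pureStep bs (nrm c) := by
        rw [bUpd, if_neg (fun hc => h ((nrm_eq_empty_iff c).mp hc))]
      rw [hn, ih, List.filter_cons_of_pos (by simp [h]), List.map_cons, List.foldl_cons]
      rfl

lemma collapse_eq_absState (cs : List String) :
    collapse_job_conclusion cs = (absState cs).1 := by
  unfold collapse_job_conclusion absState
  simp only
  rw [fold_bUpd_eq_norm]
  rcases hns : (cs.filter (fun item => PySem.Str.strip item ≠ "")).map
      (fun item => PySem.Str.lower (PySem.Str.strip item)) with _ | ⟨x, tl⟩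
  · rfl
  · rw [if_neg (by simp)]
    have hpick : (x :: tl).foldl pureStep ("", -1) = pick ((x :: tl).foldl optStep none) := by
      have := fold_pure_eq_pick (x :: tl) none
      simpa [pick] using this
    rw [hpick, max?_eq_foldl_optStep]
    simp only [List.foldl_cons, optStep]
    obtain ⟨m, hm⟩ := optStep_fold_some tl x
    rw [hm]
    rfl

-- ===== VERDICT (by name: the statement is the Claim_ definition above) =====
theorem build_job_conclusion_map_py_spec : Claim_equal_build_job_conclusion_map_py := by
  intro jobs _hdom
  unfold Spec_build_job_conclusion_map_py
  unfold build_job_conclusion_map_py build_job_conclusion_map_py_alt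
  simp only
  have hloop := loop_comm jobs PySem.Dict.empty 0
  have hme : (PySem.Dict.empty : PySem.Dict String (String × Int × Int)) = mapD PySem.Dict.empty := rfl
  rw [hme, hloop]
  set dA := (jobs.foldl aStep (PySem.Dict.empty, 0)).1 with hdA
  set t := (jobs.foldl aStep (PySem.Dict.empty, 0)).2 with ht
  have hnd : dA.keys.Nodup := nodup_aFold jobs PySem.Dict.empty 0 PySem.Dict.nodup_keys_empty
  have hsplit : dA.items.foldl aStep2 (PySem.Dict.empty, ([] : List String)) =
      (dA.items.foldl (fun jm p => jm.insert p.1 (collapse_job_conclusion p.2)) PySem.Dict.empty,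
       dA.items.foldl (fun acc p => if PySem.List.len p.2 > 1 then acc ++ [p.1] else acc) []) := by
    have h := PySem.List.foldl_prod_mk
      (fun (jm : PySem.Dict String String) (p : String × List String) =>
        jm.insert p.1 (collapse_job_conclusion p.2))
      (fun (acc : List String) (p : String × List String) =>
        if PySem.List.len p.2 > 1 then acc ++ [p.1] else acc)
      dA.items PySem.Dict.empty []
    exact h
  rw [hsplit]
  have hjm : (dA.items.foldl (fun jm p => jm.insert p.1 (collapse_job_conclusion p.2))
      PySem.Dict.empty).items = dA.items.map (fun p => (p.1, collapse_job_conclusion p.2)) := by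
    have h := PySem.Dict.items_foldl_insert_fresh dA.items (fun p => p.1)
      (fun p => collapse_job_conclusion p.2) PySem.Dict.empty
      (fun a _ => PySem.Dict.contains_empty a.1) hnd
    simpa using h
  have hdups : dA.items.foldl (fun acc p => if PySem.List.len p.2 > 1 then acc ++ [p.1] else acc)
      ([] : List String) =
      (dA.items.filter (fun p => decide (PySem.List.len p.2 > 1))).map (fun p => p.1) := by
    have h := PySem.List.foldl_append_if (fun (p : String × List String) =>
      decide (PySem.List.len p.2 > 1)) (fun p => p.1) dA.items []
    simpa using h
  refine Prod.ext ?_ (Prod.ext ?_ (Prod.ext rfl ?_))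
  · -- job_map component
    show (dA.items.foldl (fun jm p => jm.insert p.1 (collapse_job_conclusion p.2))
        PySem.Dict.empty, _).1.items = (mapD dA).items.map (fun p => (p.1, p.2.1))
    rw [hjm, items_mapD, List.map_map]
    apply List.map_congr_left
    intro p _
    simp only [Function.comp_apply, Fmap]
    rw [collapse_eq_absState]
  · -- duplicate names component
    show PySem.List.sorted (dA.items.foldl
        (fun acc p => if PySem.List.len p.2 > 1 then acc ++ [p.1] else acc) []) (fun x => x) false =
      PySem.List.sorted (((mapD dA).items.filter (fun p => decide (p.2.2.2 > 1))).map
        (fun p => p.1)) (fun x => x) false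
    rw [hdups, items_mapD]
    congr 1
    rw [List.filter_map, List.map_map]
    have hfil : dA.items.filter ((fun (p : String × String × Int × Int) =>
        decide (p.2.2.2 > 1)) ∘ Fmap) =
        dA.items.filter (fun p => decide (PySem.List.len p.2 > 1)) := by
      apply List.filter_congr
      intro p _
      simp only [Function.comp_apply, Fmap, absState, PySem.List.len]
      rfl
    rw [hfil]
    rfl
  · -- dropped count: sizes agree
    show max 0 (t - ((dA.items.foldl (fun jm p => jm.insert p.1 (collapse_job_conclusion p.2))
        PySem.Dict.empty, _).1.size : Int)) =
      max 0 (t - PySem.List.len ((mapD dA).items.map (fun p => (p.1, p.2.1))))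
    have hsz : ((dA.items.foldl (fun jm p => jm.insert p.1 (collapse_job_conclusion p.2))
        PySem.Dict.empty).size : Int) = (dA.items.length : Int) := by
      unfold PySem.Dict.size
      rw [hjm, List.length_map]
    have hlen : PySem.List.len ((mapD dA).items.map
        (fun (p : String × (String × Int × Int)) => (p.1, p.2.1))) = (dA.items.length : Int) := by
      simp [PySem.List.len, mapD]
    rw [hsz, hlen]
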